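-- pv_equiv track=rewrite | github.com/hmlund/inf246 | Assignment2.py | get_number_of_multiedges
-- ===== SOURCE A (Python) =====
-- def get_number_of_multiedges(edge_list):
--     number_of_multiedges = 0
--     dic = {}
--     for edge in edge_list:
--         e = str(sorted(edge))
--         if(e in dic):
--             number_of_multiedges += 1
--         else:
--             dic[e] = 1
--     return number_of_multiedges
-- ===== SOURCE B (Python) =====
-- def get_number_of_multiedges(edge_list):
--     keys = sorted(str(sorted(edge)) for edge in edge_list)
--     return sum(1 for a, b in zip(keys, keys[1:]) if a == b)
-- ===== Notes on version B (the rewrite author's own statement) =====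
-- stated objective: alternative
-- what changed: Replaces A's hash-based seen/unseen dict with a sort-then-scan algorithm: sort the canonical str(sorted(edge)) keys, then count adjacent equal pairs, which equals the number of repeated edges because sorting groups equal keys together.
import Mathlib
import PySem

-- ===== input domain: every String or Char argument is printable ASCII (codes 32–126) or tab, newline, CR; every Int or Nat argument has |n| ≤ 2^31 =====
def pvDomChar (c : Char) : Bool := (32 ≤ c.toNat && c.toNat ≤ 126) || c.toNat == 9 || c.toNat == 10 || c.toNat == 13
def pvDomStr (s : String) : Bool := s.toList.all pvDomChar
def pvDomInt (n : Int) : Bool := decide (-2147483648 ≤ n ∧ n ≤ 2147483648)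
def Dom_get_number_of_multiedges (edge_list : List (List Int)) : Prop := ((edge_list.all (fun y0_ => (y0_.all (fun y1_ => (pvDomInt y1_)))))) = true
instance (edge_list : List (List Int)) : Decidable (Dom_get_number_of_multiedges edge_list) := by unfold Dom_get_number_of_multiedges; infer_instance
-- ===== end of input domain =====

-- B replaces A's hash-based seen/unseen dict with sort-then-scan: sort the canonical
-- str(sorted(edge)) keys and count adjacent equal pairs; alternative algorithm, same result.

-- ===== PORT A =====
-- str(sorted(edge)): Python's list repr "[a, b, …]", exact for lists of ints
def pvKey (edge : List Int) : String :=
  "[" ++ String.intercalate ", " ((PySem.List.sorted edge (fun x => x) false).map PySem.Int.toStr) ++ "]"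

def get_number_of_multiedges (edge_list : List (List Int)) : Int :=
  (edge_list.foldl
    (fun (st : Int × PySem.Dict String Int) edge =>
      let e := pvKey edge
      if st.2.contains e then (st.1 + 1, st.2)
      else (st.1, st.2.insert e 1))
    (0, PySem.Dict.empty)).1

-- ===== PORT B =====
def get_number_of_multiedges_alt (edge_list : List (List Int)) : Int :=
  let keys := PySem.List.sorted (edge_list.map pvKey) (fun x => x) false
  (keys.zip (PySem.List.slice keys (some 1) none)).foldl
    (fun (s : Int) p => if p.1 == p.2 then s + 1 else s) 0

-- ===== PRECONDITION & SPEC =====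
def Spec_get_number_of_multiedges (edge_list : List (List Int)) (out : Int) : Prop := out = get_number_of_multiedges_alt edge_list
instance (edge_list : List (List Int)) (out : Int) : Decidable (Spec_get_number_of_multiedges edge_list out) := by unfold Spec_get_number_of_multiedges; infer_instance

-- ===== CLAIM (what is proved, stated in full; the proofs are below) =====
def Claim_equal_get_number_of_multiedges : Prop := ∀ (edge_list : List (List Int)), Dom_get_number_of_multiedges edge_list → Spec_get_number_of_multiedges edge_list (get_number_of_multiedges edge_list)

-- ===== LEMMAS AND PROOFS =====

-- adjacent-equal count of a list
def pvAdj : List String → Int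
  | a :: b :: t => (if a == b then 1 else 0) + pvAdj (b :: t)
  | _ => 0

-- A's loop over any key list: final count via the set of keys seen so far
theorem pvA_loop (ks : List String) (n : Int) (d : PySem.Dict String Int) :
    (ks.foldl
      (fun (st : Int × PySem.Dict String Int) e =>
        if st.2.contains e then (st.1 + 1, st.2)
        else (st.1, st.2.insert e 1))
      (n, d)).1
    = n + (ks.length : Int) + (d.keys.length : Int) - ((PySem.Set.update d.keys ks).length : Int) := by
  induction ks generalizing n d with
  | nil => simp [PySem.Set.update]
  | cons k ks ih =>
    by_cases h : d.contains k = true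
    · have hk : k ∈ d.keys := (PySem.Dict.contains_iff_mem_keys d k).mp h
      simp only [List.foldl_cons, h, if_true, ih, PySem.Set.update,
        PySem.Set.add_of_mem hk]
      push_cast [List.length_cons]
      ring
    · have hk : k ∉ d.keys := fun hm => h ((PySem.Dict.contains_iff_mem_keys d k).mpr hm)
      have hc : d.contains k = false := by simpa using h
      simp only [List.foldl_cons, hc, Bool.false_eq_true, if_false, ih, PySem.Set.update,
        PySem.Set.add_of_not_mem hk]
      rw [PySem.Dict.keys_insert_of_not_contains d 1 hc]
      push_cast [List.length_cons, List.length_append, List.length_nil]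
      ring

-- the zip/fold in B's port computes pvAdj
theorem pvZipFold (l : List String) (s : Int) :
    (l.zip l.tail).foldl (fun (s : Int) p => if p.1 == p.2 then s + 1 else s) s
      = s + pvAdj l := by
  induction l generalizing s with
  | nil => simp [pvAdj]
  | cons a t ih =>
    cases t with
    | nil => simp [pvAdj]
    | cons b t' =>
      simp only [List.tail_cons, List.zip_cons_cons, List.foldl_cons]
      have ih' := ih (if (a == b) = true then s + 1 else s)
      simp only [List.tail_cons] at ih'
      rw [ih']
      simp only [pvAdj]
      split_ifs <;> ring

-- on a ≤-sorted list, adjacent-equal count = length - number of distinct values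
theorem pvAdj_sorted (l : List String) (h : l.Pairwise (· ≤ ·)) :
    pvAdj l = (l.length : Int) - (l.dedup.length : Int) := by
  induction l with
  | nil => simp [pvAdj]
  | cons a t ih =>
    cases t with
    | nil => simp [pvAdj]
    | cons b t' =>
      have hp : (b :: t').Pairwise (· ≤ ·) := h.tail
      have hab : a ≤ b := (List.pairwise_cons.mp h).1 b (by simp)
      by_cases hq : a = b
      · have hm : a ∈ b :: t' := by simp [hq]
        have : pvAdj (a :: b :: t') = 1 + pvAdj (b :: t') := by simp [pvAdj, hq]
        rw [this, ih hp, List.dedup_cons_of_mem hm]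
        have hd := (List.dedup_sublist (b :: t')).length_le
        simp only [List.length_cons]
        push_cast
        omega
      · have hnm : a ∉ b :: t' := by
          intro hm
          rcases List.mem_cons.mp hm with h1 | h2
          · exact hq h1
          · have hbx : b ≤ a := (List.pairwise_cons.mp hp).1 a h2
            exact hq (le_antisymm hab hbx)
        have : pvAdj (a :: b :: t') = pvAdj (b :: t') := by
          simp [pvAdj, hq]
        rw [this, ih hp, List.dedup_cons_of_notMem hnm]
        simp only [List.length_cons]
        push_cast
        ring

theorem get_number_of_multiedges_eq (edge_list : List (List Int)) :
    get_number_of_multiedges edge_list = get_number_of_multiedges_alt edge_list := by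
  have hA : get_number_of_multiedges edge_list
      = ((edge_list.map pvKey).foldl
          (fun (st : Int × PySem.Dict String Int) e =>
            if st.2.contains e then (st.1 + 1, st.2)
            else (st.1, st.2.insert e 1))
          (0, PySem.Dict.empty)).1 :=
    congrArg Prod.fst (List.foldl_map (f := pvKey)
      (g := fun (st : Int × PySem.Dict String Int) e =>
        if st.2.contains e then (st.1 + 1, st.2)
        else (st.1, st.2.insert e 1))
      (l := edge_list) (init := (0, PySem.Dict.empty))).symm
  rw [hA]
  show _ = (let keys := PySem.List.sorted (edge_list.map pvKey) (fun x => x) false;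
    (keys.zip (PySem.List.slice keys (some 1) none)).foldl
      (fun (s : Int) p => if p.1 == p.2 then s + 1 else s) 0)
  set ks := edge_list.map pvKey with hks
  simp only
  rw [pvA_loop, PySem.List.slice_from_one, pvZipFold,
    pvAdj_sorted _ (PySem.List.sorted_pairwise ks (fun x => x))]
  have hperm : (PySem.List.sorted ks (fun x => x) false).Perm ks :=
    PySem.List.sorted_perm ks (fun x => x) false
  rw [PySem.List.length_sorted, hperm.dedup.length_eq]
  have hlen : (PySem.Set.update (PySem.Dict.empty (κ := String) (ν := Int)).keys ks).length
      = ks.dedup.length := by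
    have h1 : PySem.Set.update (PySem.Dict.empty (κ := String) (ν := Int)).keys ks
        = PySem.Set.ofList ks := by
      simp [PySem.Dict.keys_empty, PySem.Set.update_nil_left]
    rw [h1]
    exact ((List.perm_ext_iff_of_nodup (PySem.Set.nodup_ofList ks) ks.nodup_dedup).mpr
      (fun a => by simp [PySem.Set.mem_ofList, List.mem_dedup])).length_eq
  rw [hlen]
  simp [PySem.Dict.keys_empty]

-- ===== VERDICT (by name: the statement is the Claim_ definition above) =====
theorem get_number_of_multiedges_spec : Claim_equal_get_number_of_multiedges := by
  intro el _
  unfold Spec_get_number_of_multiedges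
  exact get_number_of_multiedges_eq el
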